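-- pv_equiv track=rewrite | github.com/julianctni/imir-16-17 | utilities.py | group_search_results
-- ===== SOURCE A (Python) =====
-- from itertools import groupby
-- from collections import defaultdict
--
-- def group_search_results(results, length):
--     """
--     This function groups the search results with its correspondig abstract ids.
--     The groups then contain the words with its positions and frequencys
--
--     Args:
--         results: search results
--         length: length of the phrase
--
--     """
--     result_dict = defaultdict(list)
--     sorted_results = sorted(results)
--
--     for content_id, group in groupby(sorted_results, lambda x: x[0]):
--         word_positions = []
--         group_size = 0
--
--         for value in group:
--             word_positions.append((value[1], value[2]))
--             group_size += 1
--
--         if group_size == length: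
--             result_dict[content_id] = word_positions
--
--     return result_dict
-- ===== SOURCE B (Python) =====
-- from collections import defaultdict
--
-- def group_search_results(results, length):
--     groups = defaultdict(list)
--     for value in results:
--         groups[value[0]].append((value[1], value[2]))
--     result_dict = defaultdict(list)
--     for content_id in sorted(groups):
--         bucket = groups[content_id]
--         if len(bucket) == length:
--             result_dict[content_id] = sorted(bucket)
--     return result_dict
-- ===== Notes on version B (the rewrite author's own statement) =====
-- stated objective: alternative
-- what changed: Replaces A's global sort of all triples + itertools.groupby scan with a single-pass hash partition into per-id buckets followed by sorting only the keys and each qualifying bucket's (position, frequency) pairs.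
import Mathlib
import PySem

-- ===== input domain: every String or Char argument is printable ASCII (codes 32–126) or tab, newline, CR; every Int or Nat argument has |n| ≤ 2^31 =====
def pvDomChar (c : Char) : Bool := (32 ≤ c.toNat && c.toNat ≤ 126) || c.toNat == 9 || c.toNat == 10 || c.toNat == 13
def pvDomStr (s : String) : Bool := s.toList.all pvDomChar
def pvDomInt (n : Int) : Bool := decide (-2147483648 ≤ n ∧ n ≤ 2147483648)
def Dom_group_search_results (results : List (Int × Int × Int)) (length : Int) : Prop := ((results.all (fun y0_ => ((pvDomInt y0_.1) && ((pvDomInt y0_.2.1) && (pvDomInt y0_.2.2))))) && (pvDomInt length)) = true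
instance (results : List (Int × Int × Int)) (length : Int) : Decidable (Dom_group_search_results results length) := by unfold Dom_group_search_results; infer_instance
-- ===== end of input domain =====

-- B replaces A's global sort + itertools.groupby with a one-pass hash partition into per-id buckets,
-- then sorts the keys and each qualifying bucket (alternative decomposition, same result).
-- ===== PORT A =====
-- helper: itertools.groupby(xs, key=x[0]) on the (sorted) list — consecutive runs of equal first components
def groupRuns : List (Int × Int × Int) → List (Int × List (Int × Int × Int))
  | [] => []
  | x :: t =>
      (x.1, x :: t.takeWhile (fun v => v.1 == x.1)) :: groupRuns (t.dropWhile (fun v => v.1 == x.1))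
termination_by l => l.length
decreasing_by exact Nat.lt_succ_of_le (List.length_dropWhile_le _ _)

-- sorted(results) on triples is lexicographic: key = toLex nesting (Python tuple order)
def group_search_results (results : List (Int × Int × Int)) (length : Int) : List (Int × List (Int × Int)) :=
  let sorted_results := PySem.List.sorted results (fun v => toLex (v.1, toLex (v.2.1, v.2.2))) false
  let result_dict := (groupRuns sorted_results).foldl (fun d kg =>
      let r := kg.2.foldl
        (fun (acc : List (Int × Int) × Int) v => (acc.1 ++ [(v.2.1, v.2.2)], acc.2 + 1)) ([], 0)
      if r.2 = length then d.insert kg.1 r.1 else d)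
    (PySem.Dict.empty : PySem.Dict Int (List (Int × Int)))
  result_dict.items

-- ===== PORT B =====
def group_search_results_alt (results : List (Int × Int × Int)) (length : Int) : List (Int × List (Int × Int)) :=
  let groups := results.foldl
    (fun d v => d.modify v.1 [] (fun l => l ++ [(v.2.1, v.2.2)]))
    (PySem.Dict.empty : PySem.Dict Int (List (Int × Int)))
  let result_dict := (PySem.List.sorted groups.keys (fun k => k) false).foldl (fun d content_id =>
      let bucket := groups.getD content_id []
      if PySem.List.len bucket = length then
        d.insert content_id (PySem.List.sorted bucket (fun p => toLex p) false)
      else d)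
    (PySem.Dict.empty : PySem.Dict Int (List (Int × Int)))
  result_dict.items

-- ===== PRECONDITION & SPEC =====
def Spec_group_search_results (results : List (Int × Int × Int)) (length : Int) (out : List (Int × List (Int × Int))) : Prop := out = group_search_results_alt results length
instance (results : List (Int × Int × Int)) (length : Int) (out : List (Int × List (Int × Int))) : Decidable (Spec_group_search_results results length out) := by unfold Spec_group_search_results; infer_instance

-- ===== CLAIM (what is proved, stated in full; the proofs are below) =====
def Claim_equal_group_search_results : Prop := ∀ (results : List (Int × Int × Int)) (length : Int), Dom_group_search_results results length → Spec_group_search_results results length (group_search_results results length)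

-- ===== LEMMAS AND PROOFS =====

-- the first element surviving dropWhile fails the predicate
theorem dropWhile_cons_false {α : Type} (p : α → Bool) (l t : List α) (x : α)
    (h : l.dropWhile p = x :: t) : p x = false := by
  induction l with
  | nil => simp at h
  | cons a l ih =>
    rw [List.dropWhile_cons] at h
    split at h
    · exact ih h
    · next hq => cases h; simpa using hq

-- the inner counting/append loop of A
theorem inner_fold (g : List (Int × Int × Int)) (acc : List (Int × Int) × Int) :
    g.foldl (fun (acc : List (Int × Int) × Int) v => (acc.1 ++ [(v.2.1, v.2.2)], acc.2 + 1)) acc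
      = (acc.1 ++ g.map (fun v => (v.2.1, v.2.2)), acc.2 + g.length) := by
  induction g generalizing acc with
  | nil => simp
  | cons v t ih => simp [ih]; omega

-- folding conditional fresh-key inserts into a dict, keys nodup: items = filterMap
theorem dict_fold_items {ν : Type} (c : Int → Prop) [DecidablePred c] (f : Int → ν) :
    ∀ (ks : List Int) (d : PySem.Dict Int ν), ks.Nodup → (∀ k ∈ ks, d.contains k = false) →
    (ks.foldl (fun d k => if c k then d.insert k (f k) else d) d).items
      = d.items ++ ks.filterMap (fun k => if c k then some (k, f k) else none) := by
  intro ks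
  induction ks with
  | nil => simp
  | cons k t ih =>
    intro d hnd hfresh
    have hk : d.contains k = false := hfresh k (by simp)
    have hstep : ∀ k' ∈ t, (if c k then d.insert k (f k) else d).contains k' = false := by
      intro k' hk'
      have hne : k' ≠ k := by
        intro h; exact (List.nodup_cons.mp hnd).1 (h ▸ hk')
      split
      · rw [PySem.Dict.contains_eq_decide_mem_keys]
        have hkeys : (d.insert k (f k)).keys = d.keys ++ [k] := by
          simp only [PySem.Dict.keys, PySem.Dict.items_insert_of_not_contains d (f k) hk]
          simp
        rw [hkeys]
        have : k' ∉ d.keys := by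
          have := hfresh k' (by simp [hk'])
          rw [PySem.Dict.contains_eq_decide_mem_keys] at this
          simpa using this
        simp [this, hne]
      · exact hfresh k' (by simp [hk'])
    simp only [List.foldl_cons, List.filterMap_cons]
    rw [ih _ (List.nodup_cons.mp hnd).2 hstep]
    by_cases hc : c k
    · simp [hc, PySem.Dict.items_insert_of_not_contains d (f k) hk]
    · simp [hc]

-- the bucket-building fold of B
theorem groups_getD (rs : List (Int × Int × Int)) (d : PySem.Dict Int (List (Int × Int))) (k : Int) :
    (rs.foldl (fun d v => d.modify v.1 [] (fun l => l ++ [(v.2.1, v.2.2)])) d).getD k []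
      = d.getD k [] ++ (rs.filter (fun v => v.1 == k)).map (fun v => (v.2.1, v.2.2)) := by
  induction rs generalizing d with
  | nil => simp
  | cons v t ih =>
    simp only [List.foldl_cons, List.filter_cons]
    rw [ih]
    rw [PySem.Dict.getD_modify]
    by_cases h : v.1 = k
    · simp [h]
    · have : (v.1 == k) = false := by simpa using h
      simp [this]
      intro hh; exact absurd hh.symm h

-- characterization of groupRuns on a list whose first components are sorted
theorem runs_spec : ∀ xs : List (Int × Int × Int), xs.Pairwise (fun a b => a.1 ≤ b.1) →
    (∀ p ∈ groupRuns xs, p.2 = xs.filter (fun v => v.1 == p.1)) ∧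
    ((groupRuns xs).map (·.1)).Pairwise (· < ·) ∧
    (∀ k, k ∈ (groupRuns xs).map (·.1) ↔ k ∈ xs.map (·.1)) := by
  intro xs
  induction xs using groupRuns.induct with
  | case1 => simp [groupRuns]
  | case2 x t ih =>
    intro hp
    set p : Int × Int × Int → Bool := fun v => v.1 == x.1 with hpdef
    have hsplit : t.takeWhile p ++ t.dropWhile p = t := List.takeWhile_append_dropWhile
    have hwkey : ∀ v ∈ t.takeWhile p, v.1 = x.1 := by
      intro v hv
      have := List.mem_takeWhile_imp hv
      simpa [hpdef] using this
    have hxle : ∀ v ∈ t, x.1 ≤ v.1 := fun v hv => (List.pairwise_cons.mp hp).1 v hv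
    have hpt : t.Pairwise (fun a b => a.1 ≤ b.1) := (List.pairwise_cons.mp hp).2
    have hdsub : List.Sublist (t.dropWhile p) t := List.dropWhile_sublist p
    have hpd : (t.dropWhile p).Pairwise (fun a b => a.1 ≤ b.1) := hpt.sublist hdsub
    have hdgt : ∀ v ∈ t.dropWhile p, x.1 < v.1 := by
      cases hd : t.dropWhile p with
      | nil => simp
      | cons h rest =>
        have hh : p h = false := dropWhile_cons_false p t rest h hd
        have hhm : h ∈ t := hdsub.mem (by simp [hd])
        have hne : h.1 ≠ x.1 := by rw [hpdef] at hh; simpa using hh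
        have hhgt : x.1 < h.1 := lt_of_le_of_ne (hxle h hhm) hne.symm
        intro v hv
        rcases List.mem_cons.mp hv with rfl | hv
        · exact hhgt
        · have hle : h.1 ≤ v.1 := by
            have hpd' := hpd; rw [hd] at hpd'
            exact (List.pairwise_cons.mp hpd').1 v hv
          exact lt_of_lt_of_le hhgt hle
    have hfilw : t.filter p = t.takeWhile p := by
      conv_lhs => rw [← hsplit]
      rw [List.filter_append,
        List.filter_eq_self.mpr (fun v hv => by simp [hpdef, hwkey v hv]),
        List.filter_eq_nil_iff.mpr (fun v hv => by simp [hpdef]; exact ne_of_gt (hdgt v hv)),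
        List.append_nil]
    have hfilx : (x :: t).filter p = x :: t.takeWhile p := by
      rw [List.filter_cons_of_pos (by simp [hpdef]), hfilw]
    have hfilgt : ∀ k, x.1 < k → (x :: t).filter (fun v => v.1 == k) = (t.dropWhile p).filter (fun v => v.1 == k) := by
      intro k hk
      rw [List.filter_cons_of_neg (by simp; exact ne_of_lt hk)]
      conv_lhs => rw [← hsplit]
      rw [List.filter_append,
        List.filter_eq_nil_iff.mpr (fun v hv => by simp [hwkey v hv]; exact ne_of_lt hk),
        List.nil_append]
    obtain ⟨ihc, ihpw, ihmem⟩ := ih hpd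
    refine ⟨?_, ?_, ?_⟩
    · intro q hq
      rw [groupRuns] at hq
      rcases List.mem_cons.mp hq with h | h
      · subst h; exact hfilx.symm
      · have hk : x.1 < q.1 := by
          have : q.1 ∈ (groupRuns (t.dropWhile p)).map (·.1) := List.mem_map_of_mem h
          have := (ihmem q.1).mp this
          obtain ⟨v, hv, hv1⟩ := List.mem_map.mp this
          exact hv1 ▸ hdgt v hv
        rw [ihc q h, hfilgt q.1 hk]
    · rw [groupRuns]
      simp only [List.map_cons]
      refine List.pairwise_cons.mpr ⟨?_, ihpw⟩
      intro k hk
      obtain ⟨v, hv, hv1⟩ := List.mem_map.mp ((ihmem k).mp hk)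
      exact hv1 ▸ hdgt v hv
    · intro k
      rw [groupRuns]
      simp only [List.map_cons, List.mem_cons]
      rw [ihmem k]
      constructor
      · rintro (h | h)
        · exact Or.inl h
        · obtain ⟨v, hv, hv1⟩ := List.mem_map.mp h
          exact Or.inr (hv1 ▸ List.mem_map_of_mem (hdsub.mem hv))
      · rintro (h | h)
        · exact Or.inl h
        · obtain ⟨v, hv, hv1⟩ := List.mem_map.mp h
          rw [← hsplit] at hv
          rcases List.mem_append.mp hv with hw | hd
          · exact Or.inl (hv1 ▸ (hwkey v hw))
          · exact Or.inr (hv1 ▸ List.mem_map_of_mem hd)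

-- ===== VERDICT (by name: the statement is the Claim_ definition above) =====
-- an empty dict contains nothing
theorem empty_fresh {ν : Type} (k : Int) : (PySem.Dict.empty : PySem.Dict Int ν).contains k = false := by
  rw [PySem.Dict.contains_eq_decide_mem_keys]
  simp [PySem.Dict.keys_empty]

theorem empty_items {ν : Type} : (PySem.Dict.empty : PySem.Dict Int ν).items = [] := rfl

theorem groups_getD_empty (rs : List (Int × Int × Int)) (k : Int) :
    (rs.foldl (fun d v => d.modify v.1 [] (fun l => l ++ [(v.2.1, v.2.2)])) (PySem.Dict.empty : PySem.Dict Int (List (Int × Int)))).getD k []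
      = (rs.filter (fun v => v.1 == k)).map (fun v => (v.2.1, v.2.2)) := by
  rw [groups_getD]
  simp [PySem.Dict.getD, PySem.Dict.empty, PySem.Dict.get?]

-- A's output characterized as a filterMap over the run keys
theorem charA (results : List (Int × Int × Int)) (length : Int) :
    group_search_results results length
      = ((groupRuns (PySem.List.sorted results (fun v => toLex (v.1, toLex (v.2.1, v.2.2))) false)).map (·.1)).filterMap
          (fun k =>
            if (((PySem.List.sorted results (fun v => toLex (v.1, toLex (v.2.1, v.2.2))) false).filter (fun v => v.1 == k)).length : Int) = length then
              some (k, ((PySem.List.sorted results (fun v => toLex (v.1, toLex (v.2.1, v.2.2))) false).filter (fun v => v.1 == k)).map (fun v => (v.2.1, v.2.2)))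
            else none) := by
  have hps : (PySem.List.sorted results (fun v => toLex (v.1, toLex (v.2.1, v.2.2))) false).Pairwise (fun a b => a.1 ≤ b.1) := by
    refine (PySem.List.sorted_pairwise results (fun v => toLex (v.1, toLex (v.2.1, v.2.2)))).imp ?_
    intro a b hab
    rcases Prod.Lex.toLex_le_toLex.mp hab with h | ⟨h, _⟩
    · exact le_of_lt h
    · exact le_of_eq h
  obtain ⟨hc, hpw, hmem⟩ := runs_spec _ hps
  have hKnodup : ((groupRuns (PySem.List.sorted results (fun v => toLex (v.1, toLex (v.2.1, v.2.2))) false)).map (·.1)).Nodup :=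
    hpw.imp (fun h => ne_of_lt h)
  have hruns : groupRuns (PySem.List.sorted results (fun v => toLex (v.1, toLex (v.2.1, v.2.2))) false)
      = ((groupRuns (PySem.List.sorted results (fun v => toLex (v.1, toLex (v.2.1, v.2.2))) false)).map (·.1)).map
          (fun k => (k, (PySem.List.sorted results (fun v => toLex (v.1, toLex (v.2.1, v.2.2))) false).filter (fun v => v.1 == k))) := by
    rw [List.map_map]
    symm
    refine (List.map_congr_left ?_).trans (List.map_id _)
    intro q hq
    have := (hc q hq).symm
    cases q with
    | mk k g => simpa using this
  unfold group_search_results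
  show (List.foldl (fun d kg =>
      if (List.foldl (fun (acc : List (Int × Int) × Int) v => (acc.1 ++ [(v.2.1, v.2.2)], acc.2 + 1)) ([], 0) kg.2).2 = length
      then d.insert kg.1 (List.foldl (fun (acc : List (Int × Int) × Int) v => (acc.1 ++ [(v.2.1, v.2.2)], acc.2 + 1)) ([], 0) kg.2).1 else d)
      (PySem.Dict.empty : PySem.Dict Int (List (Int × Int)))
      (groupRuns (PySem.List.sorted results (fun v => toLex (v.1, toLex (v.2.1, v.2.2))) false))).items = _
  conv_lhs => rw [hruns]
  rw [List.foldl_map]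
  simp only [inner_fold, List.nil_append, zero_add]
  rw [dict_fold_items
    (fun k => ((((PySem.List.sorted results (fun v => toLex (v.1, toLex (v.2.1, v.2.2))) false).filter (fun v => v.1 == k)).length : Int)) = length)
    (fun k => ((PySem.List.sorted results (fun v => toLex (v.1, toLex (v.2.1, v.2.2))) false).filter (fun v => v.1 == k)).map (fun v => (v.2.1, v.2.2)))
    _ _ hKnodup (fun k _ => empty_fresh k)]
  rw [empty_items, List.nil_append]

-- B's output characterized the same way
theorem charB (results : List (Int × Int × Int)) (length : Int) :
    group_search_results_alt results length
      = (PySem.List.sorted (PySem.Set.ofList (results.map (·.1))) (fun k => k) false).filterMap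
          (fun k =>
            if ((((results.filter (fun v => v.1 == k)).map (fun v => (v.2.1, v.2.2))).length : Int) = length) then
              some (k, PySem.List.sorted ((results.filter (fun v => v.1 == k)).map (fun v => (v.2.1, v.2.2))) (fun p => toLex p) false)
            else none) := by
  unfold group_search_results_alt
  show (List.foldl (fun d content_id =>
      if PySem.List.len ((List.foldl (fun d v => d.modify v.1 [] fun l => l ++ [(v.2.1, v.2.2)]) (PySem.Dict.empty : PySem.Dict Int (List (Int × Int))) results).getD content_id []) = length
      then d.insert content_id (PySem.List.sorted ((List.foldl (fun d v => d.modify v.1 [] fun l => l ++ [(v.2.1, v.2.2)]) (PySem.Dict.empty : PySem.Dict Int (List (Int × Int))) results).getD content_id []) (fun p => toLex p) false)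
      else d)
      (PySem.Dict.empty : PySem.Dict Int (List (Int × Int)))
      (PySem.List.sorted (List.foldl (fun d v => d.modify v.1 [] fun l => l ++ [(v.2.1, v.2.2)]) (PySem.Dict.empty : PySem.Dict Int (List (Int × Int))) results).keys (fun k => k) false)).items = _
  rw [PySem.Dict.keys_foldl_modify_key results (fun v => v.1) [] (fun _ v => fun l => l ++ [(v.2.1, v.2.2)]) PySem.Dict.empty]
  rw [PySem.Dict.keys_empty, PySem.Set.update_nil_left]
  simp only [groups_getD_empty, PySem.List.len]
  rw [dict_fold_items
    (fun k => ((((results.filter (fun v => v.1 == k)).map (fun v => (v.2.1, v.2.2))).length : Int)) = length)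
    (fun k => PySem.List.sorted ((results.filter (fun v => v.1 == k)).map (fun v => (v.2.1, v.2.2))) (fun p => toLex p) false)
    _ _ ((PySem.List.sorted_perm _ _ false).nodup_iff.mpr (PySem.Set.nodup_ofList _)) (fun k _ => empty_fresh k)]
  rw [empty_items, List.nil_append]

theorem group_search_results_spec : Claim_equal_group_search_results := by
  intro results length _
  unfold Spec_group_search_results
  have hps : (PySem.List.sorted results (fun v => toLex (v.1, toLex (v.2.1, v.2.2))) false).Pairwise (fun a b => a.1 ≤ b.1) := by
    refine (PySem.List.sorted_pairwise results (fun v => toLex (v.1, toLex (v.2.1, v.2.2)))).imp ?_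
    intro a b hab
    rcases Prod.Lex.toLex_le_toLex.mp hab with h | ⟨h, _⟩
    · exact le_of_lt h
    · exact le_of_eq h
  obtain ⟨hc, hpw, hmem⟩ := runs_spec _ hps
  have hKnodup : ((groupRuns (PySem.List.sorted results (fun v => toLex (v.1, toLex (v.2.1, v.2.2))) false)).map (·.1)).Nodup :=
    hpw.imp (fun h => ne_of_lt h)
  have hKsort : PySem.List.sorted (PySem.Set.ofList (results.map (·.1))) (fun k => k) false
      = (groupRuns (PySem.List.sorted results (fun v => toLex (v.1, toLex (v.2.1, v.2.2))) false)).map (·.1) := by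
    refine PySem.List.sorted_eq_of_perm_of_pairwise_lt _ _ _ ?_ hpw
    refine (List.perm_ext_iff_of_nodup hKnodup (PySem.Set.nodup_ofList _)).mpr ?_
    intro k
    rw [PySem.Set.mem_ofList, hmem k]
    constructor
    · intro h
      obtain ⟨v, hv, hv1⟩ := List.mem_map.mp h
      exact hv1 ▸ List.mem_map_of_mem ((PySem.List.sorted_perm results _ false).mem_iff.mp hv)
    · intro h
      obtain ⟨v, hv, hv1⟩ := List.mem_map.mp h
      exact hv1 ▸ List.mem_map_of_mem ((PySem.List.sorted_perm results _ false).mem_iff.mpr hv)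
  rw [charA, charB, hKsort]
  refine List.filterMap_congr ?_
  intro k _
  have hpermf : ((PySem.List.sorted results (fun v => toLex (v.1, toLex (v.2.1, v.2.2))) false).filter (fun v => v.1 == k)).Perm (results.filter (fun v => v.1 == k)) :=
    (PySem.List.sorted_perm results _ false).filter _
  have hlen : (((PySem.List.sorted results (fun v => toLex (v.1, toLex (v.2.1, v.2.2))) false).filter (fun v => v.1 == k)).length : Int)
      = (((results.filter (fun v => v.1 == k)).map (fun v => (v.2.1, v.2.2))).length : Int) := by
    rw [List.length_map, hpermf.length_eq]
  have hval : ((PySem.List.sorted results (fun v => toLex (v.1, toLex (v.2.1, v.2.2))) false).filter (fun v => v.1 == k)).map (fun v => (v.2.1, v.2.2))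
      = PySem.List.sorted ((results.filter (fun v => v.1 == k)).map (fun v => (v.2.1, v.2.2))) (fun p => toLex p) false := by
    refine PySem.List.eq_of_perm_of_pairwise_le_of_injective (fun p => toLex p) toLex.injective ?_ ?_ ?_
    · exact (hpermf.map _).trans (PySem.List.sorted_perm _ _ false).symm
    · refine List.pairwise_map.mpr ?_
      refine List.Pairwise.imp_of_mem ?_ ((PySem.List.sorted_pairwise results (fun v => toLex (v.1, toLex (v.2.1, v.2.2)))).filter _)
      intro a b ha hb hab
      have ha1 : a.1 = k := by simpa using List.of_mem_filter ha
      have hb1 : b.1 = k := by simpa using List.of_mem_filter hb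
      rcases Prod.Lex.toLex_le_toLex.mp hab with h | ⟨_, h⟩
      · rw [ha1, hb1] at h; exact absurd h (lt_irrefl k)
      · exact h
    · exact PySem.List.sorted_pairwise _ _
  rw [hlen, hval]
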